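-- pv_equiv track=rewrite | github.com/eliteankit000/DOXL-AI | lib/pdf_engine/table_engine.py | stabilize_rows
-- ===== SOURCE A (Python) =====
-- from typing import List, Dict, Tuple, Optional
--
-- def is_weak_row(row: List[str]) -> bool:
--     """
--     PHASE 4: A valid row MUST have consistent Y alignment and contain at least 2 non-empty cells.
--
--     weak_row = number_of_non_empty_cells < 2
--     """
--     non_empty = [cell for cell in row if cell and cell.strip()]
--     return len(non_empty) < 2
--
-- def stabilize_rows(rows_data: List[List[str]]) -> List[List[str]]:
--     """
--     PHASE 4: Prevent row breaking.
--
--     If weak_row: merge with previous row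
--     """
--     if not rows_data:
--         return []
--
--     stabilized = [rows_data[0]]
--
--     for row in rows_data[1:]:
--         if is_weak_row(row):
--             # Merge with previous row
--             for i in range(len(row)):
--                 if row[i]:
--                     if stabilized[-1][i]:
--                         stabilized[-1][i] += ' ' + row[i]
--                     else:
--                         stabilized[-1][i] = row[i]
--         else:
--             # Keep as separate row
--             stabilized.append(row)
--
--     return stabilized
-- ===== SOURCE B (Python) =====
-- def is_weak_row(row):
--     non_empty = [cell for cell in row if cell and cell.strip()]
--     return len(non_empty) < 2
--
-- def _fuse(group):
--     # Rebuild the anchor column-wise: each output cell is the ' '-join of the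
--     # non-blank cells in that column of the group (anchor cell first).
--     head, *weak = group
--     return [' '.join(p for p in [h] + [w[i] for w in weak if i < len(w)] if p)
--             for i, h in enumerate(head)]
--
-- def stabilize_rows(rows_data):
--     # Two-stage rewrite: (1) partition the rows into groups, each group being an
--     # anchor (the first row, or any non-weak row) plus its trailing weak rows;
--     # (2) fuse each group column-wise with ' '.join.  Returns fresh row lists
--     # (the original A mutates its kept rows in place; return values agree).
--     groups = []
--     for row in rows_data:
--         if not groups or not is_weak_row(row):
--             groups.append([row])
--         else:
--             groups[-1].append(row)
--     return [_fuse(g) for g in groups]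
-- ===== Notes on version B (the rewrite author's own statement) =====
-- stated objective: alternative
-- what changed: Replaces A's single pass that conditionally appends-or-assigns into stabilized[-1] cell by cell with a staged pipeline: first partition the rows into anchor+weak groups, then rebuild each anchor column-wise, each output cell being the ' '.join of the non-blank cells of that column of the group.
import Mathlib
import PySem

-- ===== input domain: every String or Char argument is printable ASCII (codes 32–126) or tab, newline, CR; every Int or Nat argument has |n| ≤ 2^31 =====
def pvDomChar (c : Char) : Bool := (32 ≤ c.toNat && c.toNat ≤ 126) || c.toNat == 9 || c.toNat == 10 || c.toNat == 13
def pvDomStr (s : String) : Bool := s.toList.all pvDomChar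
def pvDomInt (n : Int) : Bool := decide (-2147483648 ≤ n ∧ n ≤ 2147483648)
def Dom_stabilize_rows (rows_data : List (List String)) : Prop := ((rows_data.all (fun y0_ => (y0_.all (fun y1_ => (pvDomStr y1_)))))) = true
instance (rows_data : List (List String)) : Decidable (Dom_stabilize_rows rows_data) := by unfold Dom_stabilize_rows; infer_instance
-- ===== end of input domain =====

-- B replaces A's single in-place merge pass by a staged pipeline (group the rows, then fuse each group
-- column-wise with ' '.join); "alternative", same cost.  Python A mutates its kept row objects in place
-- while B builds fresh lists — the theorems are about the return value only.

-- ===== PORT A =====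
-- cell is truthy and cell.strip() is truthy
def pvCellFull (cell : String) : Bool := (cell != "") && (PySem.Str.strip cell != "")

def is_weak_row (row : List String) : Bool :=
  (row.filter pvCellFull).length < 2

-- inner `for i in range(len(row))` merge into the previous row; Python raises IndexError when
-- row[i] is truthy and i ≥ len(prev) — those inputs are excluded by Pre_ (List.set is a no-op there)
def pvMergeA (prev row : List String) : List String :=
  (List.range row.length).foldl (fun acc i =>
    if row.getD i "" ≠ "" then
      acc.set i (if acc.getD i "" ≠ "" then acc.getD i "" ++ " " ++ row.getD i "" else row.getD i "")
    else acc) prev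

def stabilize_rows (rows_data : List (List String)) : List (List String) :=
  match rows_data with
  | [] => []
  | r0 :: rest =>
    rest.foldl (fun stabilized row =>
      if is_weak_row row then stabilized.dropLast ++ [pvMergeA (stabilized.getLastD []) row]
      else stabilized ++ [row]) [r0]

-- ===== PORT B =====
def pvWeakB (row : List String) : Bool := row.countP pvCellFull < 2

-- `if not groups or not is_weak_row(row): groups.append([row]) else: groups[-1].append(row)`
def pvGroupStep (groups : List (List (List String))) (row : List String) : List (List (List String)) :=
  if groups.isEmpty || !pvWeakB row then groups ++ [[row]]
  else groups.dropLast ++ [groups.getLastD [] ++ [row]]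

-- `head, *weak = group; [' '.join(p for p in [h] + [w[i] for w in weak if i < len(w)] if p) for i, h in enumerate(head)]`
-- (the [] case is unreachable: groups are never empty)
def pvFuse : List (List String) → List String
  | [] => []
  | head :: weak =>
    head.mapIdx (fun i h =>
      PySem.Str.join " "
        ((h :: weak.filterMap (fun w => if i < w.length then some (w.getD i "") else none)).filter
          (fun p => p ≠ "")))

def stabilize_rows_alt (rows_data : List (List String)) : List (List String) :=
  (rows_data.foldl pvGroupStep []).map pvFuse

-- ===== PRECONDITION & SPEC =====
-- index of the anchor row that row j (j ≥ 1) merges into: the last k < j that is 0 or non-weak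
def pvAnchorIdx (rows : List (List String)) (j : Nat) : Nat :=
  (((List.range j).filter (fun k => k == 0 || !(pvWeakB (rows.getD k []))))).getLastD 0

-- Pre_ excludes exactly the inputs on which Python A raises IndexError: a weak row (after the first)
-- holding a truthy cell at an index ≥ the length of its anchor row (B ignores such cells and returns).
def Pre_stabilize_rows (rows_data : List (List String)) : Prop :=
  ∀ j < rows_data.length, ∀ i < (rows_data.getD j []).length,
    1 ≤ j → pvWeakB (rows_data.getD j []) → (rows_data.getD j []).getD i "" ≠ "" →
      i < (rows_data.getD (pvAnchorIdx rows_data j) []).length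
instance (rows_data : List (List String)) : Decidable (Pre_stabilize_rows rows_data) := by
  unfold Pre_stabilize_rows; infer_instance

def pvWitness_stabilize_rows : List (List String) := [["a", "b"], ["x", ""], ["c", "d"]]

def Spec_stabilize_rows (rows_data : List (List String)) (out : List (List String)) : Prop := out = stabilize_rows_alt rows_data
instance (rows_data : List (List String)) (out : List (List String)) : Decidable (Spec_stabilize_rows rows_data out) := by unfold Spec_stabilize_rows; infer_instance

-- ===== CLAIM (what is proved, stated in full; the proofs are below) =====
def Claim_equal_stabilize_rows : Prop := ∀ (rows_data : List (List String)), Dom_stabilize_rows rows_data → Pre_stabilize_rows rows_data → Spec_stabilize_rows rows_data (stabilize_rows rows_data)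

-- ===== LEMMAS AND PROOFS =====

theorem pv_weak_eq (r : List String) : pvWeakB r = is_weak_row r := by
  simp [pvWeakB, is_weak_row, List.countP_eq_length_filter]

-- the cell-merge operation A performs at one column
def pvMergeOne (h c : String) : String :=
  if c ≠ "" then (if h ≠ "" then h ++ " " ++ c else c) else h

-- A's in-place merge, characterised per column
theorem pv_mergeA_aux (row : List String) (n : Nat) : ∀ (prev : List String),
    (List.range n).foldl (fun acc i =>
      if row.getD i "" ≠ "" then
        acc.set i (if acc.getD i "" ≠ "" then acc.getD i "" ++ " " ++ row.getD i "" else row.getD i "")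
      else acc) prev
    = prev.mapIdx (fun i h => if i < n then pvMergeOne h (row.getD i "") else h) := by
  induction n with
  | zero =>
    intro prev
    apply List.ext_getElem <;> simp
  | succ n ih =>
    intro prev
    rw [List.range_succ, List.foldl_append, ih prev, List.foldl_cons, List.foldl_nil]
    have hacc : (prev.mapIdx fun i h => if i < n then pvMergeOne h (row.getD i "") else h).getD n ""
        = prev.getD n "" := by
      cases h : prev[n]? <;>
        simp [List.getD_eq_getElem?_getD, List.getElem?_mapIdx, h]
    by_cases hc : row.getD n "" = ""
    · simp only [hc, ne_eq, not_true_eq_false, if_neg, not_false_eq_true]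
      rw [List.mapIdx_eq_mapIdx_iff]
      intro i hi
      by_cases h1 : i < n
      · simp [h1, Nat.lt_succ_of_lt h1]
      · by_cases h2 : i < n + 1
        · have hin : i = n := by omega
          subst hin
          have hc' : row[i]?.getD "" = "" := by
            rw [List.getD_eq_getElem?_getD] at hc; exact hc
          simp [h2, pvMergeOne, hc']
        · simp [h1, h2]
    · rw [if_pos (by simpa using hc)]
      have hv : (if (prev.mapIdx fun i h => if i < n then pvMergeOne h (row.getD i "") else h).getD n "" ≠ "" then
            (prev.mapIdx fun i h => if i < n then pvMergeOne h (row.getD i "") else h).getD n "" ++ " " ++ row.getD n ""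
          else row.getD n "")
          = pvMergeOne (prev.getD n "") (row.getD n "") := by
        rw [hacc]
        have hc' : ¬ row[n]?.getD "" = "" := by
          rw [List.getD_eq_getElem?_getD] at hc; exact hc
        simp [pvMergeOne, List.getD_eq_getElem?_getD, hc']
      rw [hv]
      apply List.ext_getElem
      · simp
      · intro i hi hi'
        simp only [List.length_set, List.length_mapIdx] at hi
        rw [List.getElem_set, List.getElem_mapIdx, List.getElem_mapIdx]
        by_cases hin : n = i
        · subst hin
          have hgd2 : prev[n]?.getD "" = prev[n] := by simp [List.getElem?_eq_getElem hi]
          simp [pvMergeOne, List.getD_eq_getElem?_getD, hgd2]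
        · simp only [if_neg hin]
          by_cases h1 : i < n
          · simp [h1, Nat.lt_succ_of_lt h1]
          · have h2 : ¬ i < n + 1 := by omega
            simp [h1, h2]

theorem pv_mergeA_eq_mapIdx (prev row : List String) :
    pvMergeA prev row = prev.mapIdx (fun i h => pvMergeOne h (row.getD i "")) := by
  rw [pvMergeA, pv_mergeA_aux, List.mapIdx_eq_mapIdx_iff]
  intro i hi
  by_cases h : i < row.length
  · simp [h]
  · simp [h, pvMergeOne, List.getD_eq_getElem?_getD]

-- folding merges over the weak rows = per-column fold
theorem pv_foldl_merge (ws : List (List String)) : ∀ (head : List String),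
    ws.foldl pvMergeA head
    = head.mapIdx (fun i h => ws.foldl (fun c w => pvMergeOne c (w.getD i "")) h) := by
  induction ws with
  | nil =>
    intro head
    apply List.ext_getElem <;> simp
  | cons w ws ih =>
    intro head
    rw [List.foldl_cons, ih, pv_mergeA_eq_mapIdx, List.mapIdx_mapIdx]
    rfl

theorem pv_join_step (a b : String) (l : List String) :
    PySem.Str.join " " (a :: b :: l) = PySem.Str.join " " ((a ++ " " ++ b) :: l) := by
  have := String.toList_injective (s₁ := PySem.Str.join " " (a :: b :: l))
    (s₂ := PySem.Str.join " " ((a ++ " " ++ b) :: l))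
  apply this
  cases l with
  | nil =>
    simp [PySem.Str.toList_join, PySem.Chars.join_cons_cons, PySem.Chars.join_singleton]
  | cons c cs =>
    simp [PySem.Str.toList_join, PySem.Chars.join_cons_cons, List.append_assoc]

-- the column fold is the ' '.join of the non-blank cells
theorem pv_join_fold (i : Nat) (ws : List (List String)) : ∀ (h : String),
    PySem.Str.join " "
      ((h :: ws.filterMap (fun w => if i < w.length then some (w.getD i "") else none)).filter
        (fun p => p ≠ ""))
    = ws.foldl (fun c w => pvMergeOne c (w.getD i "")) h := by
  induction ws with
  | nil =>
    intro h
    by_cases hh : h = ""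
    · subst hh
      have : ((("" : String) :: List.filterMap (fun w => if i < w.length then some (w.getD i "") else none) ([] : List (List String))).filter (fun p => p ≠ "")) = [] := by simp
      rw [this]
      apply String.toList_injective
      simp [PySem.Str.toList_join, PySem.Chars.join_nil]
    · have : (((h : String) :: List.filterMap (fun w => if i < w.length then some (w.getD i "") else none) ([] : List (List String))).filter (fun p => p ≠ "")) = [h] := by simp [hh]
      rw [this]
      apply String.toList_injective
      simp [PySem.Str.toList_join, PySem.Chars.join_singleton]
  | cons w ws ih =>
    intro h
    rw [List.foldl_cons]
    by_cases hlen : i < w.length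
    · simp only [List.filterMap_cons, if_pos hlen]
      by_cases hc : w.getD i "" = ""
      · have hc2 : w[i]?.getD "" = "" := by
          rw [List.getD_eq_getElem?_getD] at hc; exact hc
        have : pvMergeOne h (w.getD i "") = h := by
          simp [pvMergeOne, List.getD_eq_getElem?_getD, hc2]
        rw [this]
        rw [show ((h :: w.getD i "" :: ws.filterMap (fun w => if i < w.length then some (w.getD i "") else none)).filter (fun p => p ≠ ""))
            = ((h :: ws.filterMap (fun w => if i < w.length then some (w.getD i "") else none)).filter (fun p => p ≠ "")) by
          simp [List.filter_cons, List.getD_eq_getElem?_getD, hc2]]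
        exact ih h
      · have hc2 : ¬ w[i]?.getD "" = "" := by
          rw [List.getD_eq_getElem?_getD] at hc; exact hc
        by_cases hh : h = ""
        · subst hh
          have : pvMergeOne "" (w.getD i "") = w.getD i "" := by
            simp [pvMergeOne, List.getD_eq_getElem?_getD, hc2]
          rw [this]
          rw [show ((("" : String) :: w.getD i "" :: ws.filterMap (fun w => if i < w.length then some (w.getD i "") else none)).filter (fun p => p ≠ ""))
              = ((w.getD i "" :: ws.filterMap (fun w => if i < w.length then some (w.getD i "") else none)).filter (fun p => p ≠ "")) by
            simp [List.filter_cons]]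
          exact ih (w.getD i "")
        · have hm : pvMergeOne h (w.getD i "") = h ++ " " ++ w.getD i "" := by
            simp [pvMergeOne, List.getD_eq_getElem?_getD, hc2, hh]
          rw [hm]
          have hrw : ((h :: w.getD i "" :: ws.filterMap (fun w => if i < w.length then some (w.getD i "") else none)).filter (fun p => p ≠ ""))
              = h :: w.getD i "" :: ((ws.filterMap (fun w => if i < w.length then some (w.getD i "") else none)).filter (fun p => p ≠ "")) := by
            simp [List.getD_eq_getElem?_getD, hc2, hh]
          rw [hrw, pv_join_step]
          have hrw2 : (((h ++ " " ++ w.getD i "") :: ws.filterMap (fun w => if i < w.length then some (w.getD i "") else none)).filter (fun p => p ≠ ""))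
              = (h ++ " " ++ w.getD i "") :: ((ws.filterMap (fun w => if i < w.length then some (w.getD i "") else none)).filter (fun p => p ≠ "")) := by
            simp
          rw [← hrw2]
          exact ih (h ++ " " ++ w.getD i "")
    · simp only [List.filterMap_cons, if_neg hlen]
      have hz : w[i]?.getD "" = "" := by
        simp [List.getElem?_eq_none (show w.length ≤ i by omega)]
      rw [show pvMergeOne h (w.getD i "") = h by
        simp [pvMergeOne, List.getD_eq_getElem?_getD, hz]]
      exact ih h

theorem pv_fuse_eq_fold (head : List String) (ws : List (List String)) :
    pvFuse (head :: ws) = ws.foldl pvMergeA head := by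
  rw [pv_foldl_merge]
  simp only [pvFuse]
  rw [List.mapIdx_eq_mapIdx_iff]
  intro i hi
  exact pv_join_fold i ws head[i]

-- fuse of a group, as A computes it: fold the weak rows into the anchor
def pvFuse' (g : List (List String)) : List String := g.tail.foldl pvMergeA (g.headD [])

theorem pv_fuse'_snoc (g : List (List String)) (r : List String) (hg : g ≠ []) :
    pvFuse' (g ++ [r]) = pvMergeA (pvFuse' g) r := by
  obtain ⟨h, t, rfl⟩ := List.exists_cons_of_ne_nil hg
  simp [pvFuse', List.foldl_append]

-- grouping invariant: A's fold over a suffix = fuse of B's groups over that suffix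
theorem pv_key (rest : List (List String)) :
    ∀ (gs : List (List (List String))) (g : List (List String)), g ≠ [] →
    rest.foldl (fun stabilized row =>
      if is_weak_row row then stabilized.dropLast ++ [pvMergeA (stabilized.getLastD []) row]
      else stabilized ++ [row]) ((gs ++ [g]).map pvFuse')
    = (rest.foldl pvGroupStep (gs ++ [g])).map pvFuse' := by
  induction rest with
  | nil =>
    intro gs g _
    rfl
  | cons r rest ih =>
    intro gs g hg
    rw [List.foldl_cons, List.foldl_cons]
    by_cases hw : is_weak_row r
    · have hwB : pvWeakB r = true := by rw [pv_weak_eq]; exact hw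
      have hstepA : (if is_weak_row r = true then
            ((gs ++ [g]).map pvFuse').dropLast ++ [pvMergeA (((gs ++ [g]).map pvFuse').getLastD []) r]
          else (gs ++ [g]).map pvFuse' ++ [r])
          = (gs ++ [g ++ [r]]).map pvFuse' := by
        rw [if_pos hw]
        simp only [List.map_append, List.map_cons, List.map_nil,
          List.dropLast_concat, List.getLastD_concat]
        rw [← pv_fuse'_snoc g r hg]
      have hstep : pvGroupStep (gs ++ [g]) r = gs ++ [g ++ [r]] := by
        simp [pvGroupStep, hwB]
      rw [hstepA, hstep]
      exact ih gs (g ++ [r]) (by simp)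
    · have hwB : pvWeakB r = false := by rw [pv_weak_eq]; simpa using hw
      have hstepA : (if is_weak_row r = true then
            ((gs ++ [g]).map pvFuse').dropLast ++ [pvMergeA (((gs ++ [g]).map pvFuse').getLastD []) r]
          else (gs ++ [g]).map pvFuse' ++ [r])
          = (((gs ++ [g]) ++ [[r]])).map pvFuse' := by
        rw [if_neg hw]
        simp [pvFuse']
      have hstep : pvGroupStep (gs ++ [g]) r = (gs ++ [g]) ++ [[r]] := by
        simp [pvGroupStep, hwB]
      rw [hstepA, hstep]
      exact ih (gs ++ [g]) [r] (by simp)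

theorem pv_groups_all_ne_nil (rest : List (List String)) : ∀ (groups : List (List (List String))),
    (∀ g ∈ groups, g ≠ []) → ∀ g ∈ rest.foldl pvGroupStep groups, g ≠ [] := by
  induction rest with
  | nil =>
    intro groups hall g hone
    exact hall g hone
  | cons r rest ih =>
    intro groups hall
    rw [List.foldl_cons]
    apply ih
    intro g hg
    unfold pvGroupStep at hg
    split at hg
    · rcases List.mem_append.mp hg with h | h
      · exact hall g h
      · simp at h; simp [h]
    · rcases List.mem_append.mp hg with h | h
      · exact hall g (List.dropLast_subset _ h)
      · simp at h; simp [h]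

-- ===== VERDICT (by name: the statement is the Claim_ definition above) =====
theorem stabilize_rows_spec : Claim_equal_stabilize_rows := by
  intro rows _ _
  unfold Spec_stabilize_rows
  cases rows with
  | nil => rfl
  | cons r0 rest =>
    have hA : stabilize_rows (r0 :: rest)
        = rest.foldl (fun stabilized row =>
            if is_weak_row row then stabilized.dropLast ++ [pvMergeA (stabilized.getLastD []) row]
            else stabilized ++ [row]) [r0] := rfl
    have hB : stabilize_rows_alt (r0 :: rest)
        = (rest.foldl pvGroupStep [[r0]]).map pvFuse := by
      rw [stabilize_rows_alt, List.foldl_cons]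
      rw [show pvGroupStep [] r0 = [[r0]] by simp [pvGroupStep]]
    rw [hA, hB]
    have h0 : ([r0] : List (List String)) = (([] ++ [[r0]]) : List (List (List String))).map pvFuse' := by
      simp [pvFuse']
    rw [h0, pv_key rest [] [r0] (by simp)]
    simp only [List.nil_append]
    apply List.map_congr_left
    intro g hg
    have hgne : g ≠ [] := pv_groups_all_ne_nil rest [[r0]] (by simp) g hg
    obtain ⟨head, ws, rfl⟩ := List.exists_cons_of_ne_nil hgne
    rw [pv_fuse_eq_fold]
    rfl
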